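-- pv_equiv track=rewrite | github.com/ludia8888/Engram | src/engram/context_builder.py | _truncate_sections
-- ===== SOURCE A (Python) =====
-- import math
--
-- def _estimate_tokens(text: str) -> int:
--     return max(1, math.ceil(len(text) / 4))
--
-- def _truncate_sections(sections: list[list[str]], max_tokens: int) -> str:
--     lines: list[str] = []
--     used = 0
--     for section in sections:
--         if not section:
--             continue
--         if lines:
--             candidate = "\n"
--             if used + _estimate_tokens(candidate) > max_tokens:
--                 break
--             lines.append("")
--             used += _estimate_tokens(candidate)
--         for line in section:
--             tokens = _estimate_tokens(line)
--             if used + tokens > max_tokens: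
--                 return "\n".join(lines).strip()
--             lines.append(line)
--             used += tokens
--     return "\n".join(lines).strip()
-- ===== SOURCE B (Python) =====
-- import math
-- from itertools import accumulate
--
--
-- def _estimate_tokens(text: str) -> int:
--     return max(1, math.ceil(len(text) / 4))
--
--
-- def _truncate_sections(sections: list[list[str]], max_tokens: int) -> str:
--     # Flatten to one stream of units: a "" separator (cost 1, like "\n")
--     # before every non-empty section after the first, then the section's lines.
--     units: list[str] = []
--     for section in sections:
--         if section:
--             if units:
--                 units.append("")
--             units += section
--     # Table of cumulative token costs; cut at the largest prefix within budget.
--     cums = list(accumulate(map(_estimate_tokens, units)))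
--     k = 0
--     while k < len(cums) and cums[k] <= max_tokens:
--         k += 1
--     return "\n".join(units[:k]).strip()
-- ===== Notes on version B (the rewrite author's own statement) =====
-- stated objective: alternative
-- what changed: Replaces A's interleaved nested accumulate-and-break loops (with two exit modes) by a flatten-then-cut shape: first flatten the sections into one stream of unit strings with explicit "" separator units, then build the cumulative token-cost table and cut at the largest prefix within budget.
import Mathlib
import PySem

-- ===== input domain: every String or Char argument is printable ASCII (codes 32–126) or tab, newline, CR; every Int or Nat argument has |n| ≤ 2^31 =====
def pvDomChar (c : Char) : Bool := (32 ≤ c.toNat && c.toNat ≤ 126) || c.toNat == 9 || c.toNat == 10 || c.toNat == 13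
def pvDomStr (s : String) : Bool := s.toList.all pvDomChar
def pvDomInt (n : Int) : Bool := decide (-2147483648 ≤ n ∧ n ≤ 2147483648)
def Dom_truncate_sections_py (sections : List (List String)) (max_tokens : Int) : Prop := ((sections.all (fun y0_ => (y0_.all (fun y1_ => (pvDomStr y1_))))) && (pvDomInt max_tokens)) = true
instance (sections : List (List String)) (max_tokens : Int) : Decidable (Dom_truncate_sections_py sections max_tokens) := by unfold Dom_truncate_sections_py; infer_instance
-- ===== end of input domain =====

-- ===== PORT A =====
-- B changes only the decomposition (flatten units + cumulative-cost table vs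
-- interleaved accumulate-and-break loops); same cost, same return value.

-- max(1, math.ceil(len(text) / 4)); ceil(n/4) for n ≥ 0 ported exactly as (n+3)//4
def estimateTokens (text : String) : Int :=
  max 1 (PySem.Int.floordiv (PySem.Str.len text + 3) 4)

-- inner 'for line in section' loop of A; Bool = True means 'return' was hit
def tsAInner (max_tokens : Int) (lines : List String) (used : Int) :
    List String → List String × Int × Bool
  | [] => (lines, used, false)
  | line :: rest =>
    let tokens := estimateTokens line
    if used + tokens > max_tokens then (lines, used, true)
    else tsAInner max_tokens (lines ++ [line]) (used + tokens) rest

-- outer 'for section in sections' loop of A (break/return both end in the same join)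
def tsAOuter (max_tokens : Int) (lines : List String) (used : Int) :
    List (List String) → List String
  | [] => lines
  | sec :: rest =>
    if sec = [] then tsAOuter max_tokens lines used rest
    else if lines ≠ [] then
      -- candidate = "\n"; _estimate_tokens("\n") = 1
      if used + 1 > max_tokens then lines
      else
        match tsAInner max_tokens (lines ++ [""]) (used + 1) sec with
        | (l, _, true) => l
        | (l, u, false) => tsAOuter max_tokens l u rest
    else
      match tsAInner max_tokens lines used sec with
      | (l, _, true) => l
      | (l, u, false) => tsAOuter max_tokens l u rest

def truncate_sections_py (sections : List (List String)) (max_tokens : Int) : String :=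
  PySem.Str.strip (PySem.Str.join "\n" (tsAOuter max_tokens [] 0 sections))

-- ===== PORT B =====
-- unit-flattening loop of Source B (foldl = its for-loop over sections)
def tsUnits (sections : List (List String)) : List String :=
  sections.foldl
    (fun units sec =>
      if sec ≠ [] then (if units ≠ [] then units ++ [""] else units) ++ sec
      else units) []

-- itertools.accumulate of the cost list
def tsAccum (acc : Int) : List Int → List Int
  | [] => []
  | c :: cs => (acc + c) :: tsAccum (acc + c) cs

-- 'while k < len(cums) and cums[k] <= max_tokens: k += 1'
def tsCut (max_tokens : Int) (cums : List Int) : Nat :=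
  (cums.takeWhile (fun c => c ≤ max_tokens)).length

def truncate_sections_py_alt (sections : List (List String)) (max_tokens : Int) : String :=
  let units := tsUnits sections
  let cums := tsAccum 0 (units.map estimateTokens)
  PySem.Str.strip (PySem.Str.join "\n" (units.take (tsCut max_tokens cums)))

-- ===== PRECONDITION & SPEC =====
def Spec_truncate_sections_py (sections : List (List String)) (max_tokens : Int) (out : String) : Prop := out = truncate_sections_py_alt sections max_tokens
instance (sections : List (List String)) (max_tokens : Int) (out : String) : Decidable (Spec_truncate_sections_py sections max_tokens out) := by unfold Spec_truncate_sections_py; infer_instance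

-- ===== CLAIM (what is proved, stated in full; the proofs are below) =====
def Claim_equal_truncate_sections_py : Prop := ∀ (sections : List (List String)) (max_tokens : Int), Dom_truncate_sections_py sections max_tokens → Spec_truncate_sections_py sections max_tokens (truncate_sections_py sections max_tokens)

-- ===== LEMMAS AND PROOFS =====

-- greedy over the flattened unit stream: the common middle form of both programs
def tsGreedy (max_tokens : Int) (kept : List String) (used : Int) : List String → List String
  | [] => kept
  | u :: rest =>
    let c := estimateTokens u
    if used + c > max_tokens then kept
    else tsGreedy max_tokens (kept ++ [u]) (used + c) rest

-- the unit stream, with a flag saying whether some unit was already emitted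
def tsUnitsFrom (started : Bool) : List (List String) → List String
  | [] => []
  | sec :: rest =>
    if sec = [] then tsUnitsFrom started rest
    else (if started then [""] else []) ++ sec ++ tsUnitsFrom true rest

lemma estimateTokens_empty : estimateTokens "" = 1 := by decide

lemma tsAInner_prefix (M : Int) (sec : List String) :
    ∀ lines used, ∃ t, (tsAInner M lines used sec).1 = lines ++ t := by
  induction sec with
  | nil => intro lines used; exact ⟨[], by simp [tsAInner]⟩
  | cons x xs ih =>
    intro lines used
    simp only [tsAInner]
    split
    · exact ⟨[], by simp⟩
    · obtain ⟨t, ht⟩ := ih (lines ++ [x]) (used + estimateTokens x)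
      exact ⟨x :: t, by simpa using ht⟩

lemma tsAInner_ne_nil (M : Int) (sec : List String) (lines : List String) (used : Int)
    (h : sec ≠ []) (hs : (tsAInner M lines used sec).2.2 = false) :
    (tsAInner M lines used sec).1 ≠ [] := by
  cases sec with
  | nil => exact absurd rfl h
  | cons x xs =>
    simp only [tsAInner] at hs ⊢
    by_cases hle : used + estimateTokens x > M
    · rw [if_pos hle] at hs; simp at hs
    · rw [if_neg hle] at hs ⊢
      obtain ⟨t, ht⟩ := tsAInner_prefix M xs (lines ++ [x]) (used + estimateTokens x)
      rw [ht]; simp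

-- inner loop ↔ greedy on sec ++ more
lemma tsAInner_greedy (M : Int) (sec : List String) :
    ∀ lines used more,
      tsGreedy M lines used (sec ++ more) =
        (match tsAInner M lines used sec with
         | (l, _, true) => l
         | (l, u, false) => tsGreedy M l u more) := by
  induction sec with
  | nil => intro lines used more; simp [tsAInner]
  | cons x xs ih =>
    intro lines used more
    simp only [List.cons_append, tsGreedy, tsAInner]
    split
    · rfl
    · exact ih (lines ++ [x]) (used + estimateTokens x) more

-- outer loop ↔ greedy on the unit stream
lemma tsAOuter_greedy (M : Int) (sections : List (List String)) :
    ∀ lines used,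
      tsAOuter M lines used sections = tsGreedy M lines used (tsUnitsFrom (lines ≠ []) sections) := by
  induction sections with
  | nil => intro lines used; simp [tsAOuter, tsUnitsFrom, tsGreedy]
  | cons sec rest ih =>
    intro lines used
    by_cases hsec : sec = []
    · simp only [tsAOuter, tsUnitsFrom, hsec, if_pos]
      exact ih lines used
    · by_cases hl : lines = []
      · subst hl
        simp only [tsAOuter, tsUnitsFrom, hsec, ne_eq, not_true_eq_false, decide_false,
          Bool.false_eq_true, if_false, List.nil_append]
        rw [tsAInner_greedy M sec [] used]
        rcases hres : tsAInner M [] used sec with ⟨l, u, stop⟩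
        cases stop
        · have hlne : l ≠ [] := by
            have h2 := tsAInner_ne_nil M sec [] used hsec (by rw [hres])
            rwa [hres] at h2
          show tsAOuter M l u rest = tsGreedy M l u (tsUnitsFrom true rest)
          rw [ih l u]
          simp [hlne]
        · rfl
      · have hstream : tsUnitsFrom (decide (lines ≠ [])) (sec :: rest) =
            "" :: (sec ++ tsUnitsFrom true rest) := by
          simp [tsUnitsFrom, hsec, hl]
        rw [hstream]
        simp only [tsAOuter, hsec, hl, ne_eq, not_false_eq_true, ite_true,
          if_neg, tsGreedy, estimateTokens_empty]
        by_cases hsep : used + 1 > M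
        · rw [if_pos hsep, if_pos hsep]
        · rw [if_neg hsep, if_neg hsep]
          rw [tsAInner_greedy M sec (lines ++ [""]) (used + 1)]
          rcases hres : tsAInner M (lines ++ [""]) (used + 1) sec with ⟨l, u, stop⟩
          cases stop
          · have hlne : l ≠ [] := by
              obtain ⟨t, ht⟩ := tsAInner_prefix M sec (lines ++ [""]) (used + 1)
              rw [hres] at ht; simp only [] at ht
              rw [ht]; simp
            show tsAOuter M l u rest = tsGreedy M l u (tsUnitsFrom true rest)
            rw [ih l u]
            simp [hlne]
          · rfl

-- greedy ↔ take on the cumulative table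
lemma tsGreedy_take (M : Int) (units : List String) :
    ∀ kept used,
      tsGreedy M kept used units =
        kept ++ units.take (tsCut M (tsAccum used (units.map estimateTokens))) := by
  induction units with
  | nil => intro kept used; simp [tsGreedy, tsAccum, tsCut]
  | cons u rest ih =>
    intro kept used
    simp only [tsGreedy, List.map_cons, tsAccum, tsCut, List.takeWhile]
    by_cases hc : used + estimateTokens u > M
    · have : decide (used + estimateTokens u ≤ M) = false := by
        simp; omega
      simp [hc, this]
    · have : decide (used + estimateTokens u ≤ M) = true := by
        simp; omega
      simp only [hc, if_false, this]
      rw [ih (kept ++ [u]) (used + estimateTokens u)]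
      simp [tsCut]

-- B's foldl builds exactly the unit stream
lemma tsUnits_foldl (sections : List (List String)) :
    ∀ acc : List String,
      sections.foldl
        (fun units sec =>
          if sec ≠ [] then (if units ≠ [] then units ++ [""] else units) ++ sec
          else units) acc = acc ++ tsUnitsFrom (acc ≠ []) sections := by
  induction sections with
  | nil => intro acc; simp [tsUnitsFrom]
  | cons sec rest ih =>
    intro acc
    rw [List.foldl_cons]
    by_cases hsec : sec = []
    · have hstep : (if sec ≠ [] then (if acc ≠ [] then acc ++ [""] else acc) ++ sec else acc)
          = acc := by simp [hsec]
      rw [hstep, ih acc]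
      simp [tsUnitsFrom, hsec]
    · by_cases ha : acc = []
      · subst ha
        have hstep : (if sec ≠ ([] : List String) then
            (if ([] : List String) ≠ [] then [] ++ [""] else ([] : List String)) ++ sec
            else []) = sec := by simp [hsec]
        rw [hstep, ih sec]
        simp [tsUnitsFrom, hsec]
      · have hstep : (if sec ≠ [] then (if acc ≠ [] then acc ++ [""] else acc) ++ sec else acc)
          = (acc ++ [""]) ++ sec := by simp [hsec, ha]
        rw [hstep, ih ((acc ++ [""]) ++ sec)]
        simp [tsUnitsFrom, hsec, ha]

-- ===== VERDICT (by name: the statement is the Claim_ definition above) =====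
theorem truncate_sections_py_spec : Claim_equal_truncate_sections_py := by
  intro sections max_tokens _
  unfold Spec_truncate_sections_py truncate_sections_py truncate_sections_py_alt
  have hu : tsUnits sections = tsUnitsFrom false sections := by
    unfold tsUnits; rw [tsUnits_foldl sections []]; simp
  rw [tsAOuter_greedy max_tokens sections [] 0, hu]
  simp only [ne_eq, not_true_eq_false, decide_false]
  rw [tsGreedy_take max_tokens (tsUnitsFrom false sections) [] 0]
  simp
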